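-- pv_equiv track=rewrite | github.com/egrigsby/CoxeterArtinProject | CoxeterArtinGroupGeneration.py | reduce_artin_word
-- ===== SOURCE A (Python) =====
-- def reduce_artin_word(w):
--   stack = []
--   for x in w:
--     if stack and stack[-1] == -x:
--       stack.pop()
--     else:
--       stack.append(x)
--   return stack
-- ===== SOURCE B (Python) =====
-- def reduce_artin_word(w):
--     word = list(w)
--     changed = True
--     while changed:
--         changed = False
--         for i in range(len(word) - 1):
--             if word[i] == -word[i + 1]:
--                 del word[i:i + 2]
--                 changed = True
--                 break
--     return word
-- ===== Notes on version B (the rewrite author's own statement) =====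
-- stated objective: alternative
-- what changed: Replaced the one-pass stack (push, pop on inverse top) by naive fixpoint rescanning: repeatedly find the first adjacent inverse pair in the whole word, delete it, restart the scan until no pair remains.
import Mathlib
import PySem

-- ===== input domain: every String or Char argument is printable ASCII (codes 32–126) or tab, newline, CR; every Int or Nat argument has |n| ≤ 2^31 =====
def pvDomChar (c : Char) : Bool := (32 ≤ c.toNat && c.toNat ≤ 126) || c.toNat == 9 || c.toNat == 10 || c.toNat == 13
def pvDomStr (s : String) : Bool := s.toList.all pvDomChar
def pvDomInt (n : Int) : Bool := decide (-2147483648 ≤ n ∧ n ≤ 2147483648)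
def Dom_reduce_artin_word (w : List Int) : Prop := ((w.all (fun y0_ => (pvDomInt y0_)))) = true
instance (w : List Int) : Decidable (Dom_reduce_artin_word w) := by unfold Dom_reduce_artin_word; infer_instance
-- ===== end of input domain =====

-- B replaces A's one-pass stack by naive fixpoint rescanning (find first adjacent
-- inverse pair, delete it, restart until none remains); alternative decomposition,
-- not faster.

-- ===== PORT A =====
-- Python A: stack = []; for x in w: if stack and stack[-1] == -x: stack.pop()
--           else: stack.append(x); return stack
def reduce_artin_word (w : List Int) : List Int :=
  w.foldl (fun stack x =>
    if stack.getLast? = some (-x) then stack.dropLast else stack ++ [x]) []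

-- ===== PORT B =====
-- delete the first adjacent inverse pair (the inner for-loop with break); none = no pair
def pvScanOnce : List Int → Option (List Int)
  | a :: b :: r => if a = -b then some r else (pvScanOnce (b :: r)).map (a :: ·)
  | _ => none

theorem pvScanOnce_length : ∀ (w w' : List Int), pvScanOnce w = some w' → w'.length < w.length := by
  intro w
  induction w with
  | nil => simp [pvScanOnce]
  | cons a t ih =>
    cases t with
    | nil => simp [pvScanOnce]
    | cons b r =>
      intro w' h
      by_cases hab : a = -b
      · simp [pvScanOnce, hab] at h
        simp [← h]
      · simp [pvScanOnce, hab] at h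
        obtain ⟨r', hr', hw'⟩ := h
        have := ih r' hr'
        subst hw'
        simp at this ⊢
        omega

-- the outer while-loop: delete first pair, repeat until none remains
def reduce_artin_word_alt (w : List Int) : List Int :=
  match h : pvScanOnce w with
  | some w' => reduce_artin_word_alt w'
  | none => w
termination_by w.length
decreasing_by exact pvScanOnce_length _ _ h

-- ===== PRECONDITION & SPEC =====
def Spec_reduce_artin_word (w : List Int) (out : List Int) : Prop := out = reduce_artin_word_alt w
instance (w : List Int) (out : List Int) : Decidable (Spec_reduce_artin_word w out) := by unfold Spec_reduce_artin_word; infer_instance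

-- ===== CLAIM (what is proved, stated in full; the proofs are below) =====
def Claim_equal_reduce_artin_word : Prop := ∀ (w : List Int), Dom_reduce_artin_word w → Spec_reduce_artin_word w (reduce_artin_word w)

-- ===== LEMMAS AND PROOFS =====

-- A's stack step, on the reversed stack (head = top of stack)
def rstep (s : List Int) (x : Int) : List Int :=
  if s.head? = some (-x) then s.tail else x :: s

theorem step_eq (s : List Int) (x : Int) :
    (if s.getLast? = some (-x) then s.dropLast else s ++ [x]) = (rstep s.reverse x).reverse := by
  unfold rstep
  rw [List.head?_reverse]
  split_ifs with h
  · rw [List.tail_reverse, List.reverse_reverse]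
  · simp

theorem foldA (w : List Int) : ∀ (s : List Int),
    w.foldl (fun stack x => if stack.getLast? = some (-x) then stack.dropLast else stack ++ [x]) s
      = (w.foldl rstep s.reverse).reverse := by
  induction w with
  | nil => simp
  | cons x r ih =>
    intro s
    simp only [List.foldl_cons]
    rw [step_eq, ih, List.reverse_reverse]

-- invariant: the stack (head = top) never carries an adjacent inverse pair
def RRed (s : List Int) : Prop := List.IsChain (fun x y => y ≠ -x) s

theorem rred_step {s : List Int} (hs : RRed s) (x : Int) : RRed (rstep s x) := by
  unfold rstep
  split_ifs with h
  · cases s with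
    | nil => exact hs
    | cons y t => exact hs.of_cons
  · cases s with
    | nil => exact List.isChain_singleton x
    | cons y t =>
      refine List.isChain_cons_cons.mpr ⟨?_, hs⟩
      intro hxy
      exact h (by simp [hxy])

theorem cancel {s : List Int} (hs : RRed s) {a b : Int} (hab : a = -b) :
    rstep (rstep s a) b = s := by
  by_cases h : s.head? = some (-a)
  · cases s with
    | nil => simp at h
    | cons z t =>
      simp at h
      subst h
      have h1 : rstep (-a :: t) a = t := by simp [rstep]
      rw [h1]
      have ht : t.head? ≠ some (-b) := by
        cases t with
        | nil => simp
        | cons c t' =>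
          have hc : c ≠ -(-a) := (List.isChain_cons_cons.mp hs).1
          simp at hc ⊢
          omega
      simp [rstep, ht]
      omega
  · have h1 : rstep s a = a :: s := by simp [rstep, h]
    rw [h1]
    have : (a :: s).head? = some (-b) := by simp; omega
    simp [rstep, this]

theorem scan_some (w : List Int) : ∀ (w' : List Int), pvScanOnce w = some w' →
    ∀ (s : List Int), RRed s → w.foldl rstep s = w'.foldl rstep s := by
  induction w with
  | nil => simp [pvScanOnce]
  | cons a t ih =>
    cases t with
    | nil => simp [pvScanOnce]
    | cons b r =>
      intro w' h s hs
      by_cases hab : a = -b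
      · simp [pvScanOnce, hab] at h
        subst h
        simp only [List.foldl_cons]
        rw [cancel hs hab]
      · simp [pvScanOnce, hab] at h
        obtain ⟨r', hr', hw'⟩ := h
        subst hw'
        simp only [List.foldl_cons]
        exact ih r' hr' (rstep s a) (rred_step hs a)

theorem scan_none : ∀ (w : List Int), pvScanOnce w = none →
    List.IsChain (fun a b => a ≠ -b) w := by
  intro w
  induction w with
  | nil => exact fun _ => List.isChain_nil
  | cons a t ih =>
    cases t with
    | nil => exact fun _ => List.isChain_singleton a
    | cons b r =>
      intro h
      by_cases hab : a = -b
      · simp [pvScanOnce, hab] at h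
      · simp [pvScanOnce, hab] at h
        exact List.isChain_cons_cons.mpr ⟨hab, ih h⟩

theorem nored : ∀ (w : List Int), List.IsChain (fun a b => a ≠ -b) w →
    ∀ (s : List Int), (∀ x, w.head? = some x → s.head? ≠ some (-x)) →
    w.foldl rstep s = w.reverse ++ s := by
  intro w
  induction w with
  | nil => simp
  | cons x r ih =>
    intro hw s hcomp
    have hpush : rstep s x = x :: s := by
      simp [rstep, hcomp x rfl]
    simp only [List.foldl_cons, hpush]
    rw [ih hw.of_cons (x :: s) ?_]
    · simp
    · intro y hy
      cases r with
      | nil => simp at hy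
      | cons b r' =>
        simp at hy
        subst hy
        have hxb : x ≠ -b := (List.isChain_cons_cons.mp hw).1
        simp
        omega

theorem alt_props (w : List Int) :
    (reduce_artin_word_alt w).foldl rstep [] = w.foldl rstep [] ∧
    pvScanOnce (reduce_artin_word_alt w) = none := by
  fun_induction reduce_artin_word_alt w with
  | case1 w w' h ih =>
    refine ⟨?_, ih.2⟩
    rw [ih.1, scan_some w w' h [] List.isChain_nil]
  | case2 w h => exact ⟨rfl, h⟩

-- ===== VERDICT (by name: the statement is the Claim_ definition above) =====
theorem reduce_artin_word_spec : Claim_equal_reduce_artin_word := by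
  intro w _
  unfold Spec_reduce_artin_word
  obtain ⟨h1, h2⟩ := alt_props w
  have hch := scan_none _ h2
  have hn := nored _ hch [] (by simp)
  unfold reduce_artin_word
  rw [foldA]
  simp only [List.reverse_nil]
  rw [← h1, hn]
  simp
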